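-- pv_equiv track=rewrite | github.com/AidanCurley/AdvProgModule | advent_of_code/Advent 18.py | get_indexes_of_parentheses
-- ===== SOURCE A (Python) =====
-- def get_indexes_of_parentheses(expression):
--     first_parenthesis, last_parenthesis = 0, 0
--     for index,ch in enumerate(list(expression)):
--         if ch == '(':
--             first_parenthesis = index
--         elif ch == ')':
--             last_parenthesis = index
--             return first_parenthesis, last_parenthesis
-- ===== SOURCE B (Python) =====
-- def get_indexes_of_parentheses(expression):
--     close = expression.find(')')
--     if close == -1:
--         return None
--     return max(expression.rfind('(', 0, close), 0), close
-- ===== Notes on version B (the rewrite author's own statement) =====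
-- stated objective: faster
-- what changed: Replaces the left-to-right accumulating character loop by two directed string searches: find the first closing parenthesis and rfind the last opening parenthesis before it (defaulting to index 0 when there is none, as A's zero-initialised accumulator does).
import Mathlib
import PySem

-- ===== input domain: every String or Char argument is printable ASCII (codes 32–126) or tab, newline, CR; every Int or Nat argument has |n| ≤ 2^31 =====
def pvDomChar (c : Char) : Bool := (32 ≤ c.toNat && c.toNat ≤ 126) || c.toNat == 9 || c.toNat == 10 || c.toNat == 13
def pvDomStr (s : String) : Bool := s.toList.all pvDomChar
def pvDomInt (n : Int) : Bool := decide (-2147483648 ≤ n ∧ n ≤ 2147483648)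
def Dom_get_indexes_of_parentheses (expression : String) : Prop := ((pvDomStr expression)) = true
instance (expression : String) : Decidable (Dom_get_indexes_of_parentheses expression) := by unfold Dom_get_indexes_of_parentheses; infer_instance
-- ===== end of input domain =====

-- B replaces A's accumulating left-to-right character loop by two directed searches
-- (find the first closing parenthesis, rfind the last opening one before it); the
-- timing run measured B faster by a constant factor (C-level searches vs a Python loop).


-- ===== PORT A =====
-- the for-loop over enumerate(list(expression)) with its early return, as structural
-- recursion carrying the two accumulators first_parenthesis, last_parenthesis
def goA : List (Int × Char) → Int → Int → Option (Int × Int)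
  | [], _, _ => none
  | (index, ch) :: rest, first_parenthesis, last_parenthesis =>
      if ch = '(' then goA rest index last_parenthesis
      else if ch = ')' then
        let last_parenthesis := index
        some (first_parenthesis, last_parenthesis)
      else goA rest first_parenthesis last_parenthesis

def get_indexes_of_parentheses (expression : String) : Option (Int × Int) :=
  goA (PySem.List.enumerate expression.toList) 0 0

-- ===== PORT B =====
def get_indexes_of_parentheses_alt (expression : String) : Option (Int × Int) :=
  let close := PySem.Str.find expression ")"
  if close = -1 then none
  else some (max (PySem.Str.rfindFrom expression "(" 0 (some close)) 0, close)

-- ===== PRECONDITION & SPEC =====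
def Spec_get_indexes_of_parentheses (expression : String) (out : Option (Int × Int)) : Prop := out = get_indexes_of_parentheses_alt expression
instance (expression : String) (out : Option (Int × Int)) : Decidable (Spec_get_indexes_of_parentheses expression out) := by unfold Spec_get_indexes_of_parentheses; infer_instance

-- ===== CLAIM (what is proved, stated in full; the proofs are below) =====
def Claim_equal_get_indexes_of_parentheses : Prop := ∀ (expression : String), Dom_get_indexes_of_parentheses expression → Spec_get_indexes_of_parentheses expression (get_indexes_of_parentheses expression)

-- ===== LEMMAS AND PROOFS =====

-- find.go offset shift, single-char pattern
theorem findgo_shift (x : Char) (s : List Char) (k : Nat) :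
    PySem.Chars.find.go [x] s k =
      if PySem.Chars.find.go [x] s 0 = -1 then -1 else PySem.Chars.find.go [x] s 0 + k := by
  induction s generalizing k with
  | nil => simp [PySem.Chars.find.go]
  | cons c cs ih =>
    simp only [PySem.Chars.find.go]
    by_cases h : List.isPrefixOf [x] (c :: cs)
    · simp [h]
    · simp only [h, Bool.false_eq_true, if_false]
      rw [ih (k + 1), ih 1]
      have hge : -1 ≤ PySem.Chars.find cs [x] := PySem.Chars.neg_one_le_find cs [x]
      simp only [PySem.Chars.find] at hge
      by_cases h1 : PySem.Chars.find.go [x] cs 0 = -1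
      · simp [h1]
      · have h2 : PySem.Chars.find.go [x] cs 0 + 1 ≠ -1 := by omega
        simp only [h1, Bool.false_eq_true, if_false, if_neg h1, h2, if_neg h2]
        omega

theorem find_cons (x c : Char) (cs : List Char) :
    PySem.Chars.find (c :: cs) [x] =
      if c = x then 0
      else if PySem.Chars.find cs [x] = -1 then -1 else PySem.Chars.find cs [x] + 1 := by
  simp only [PySem.Chars.find, PySem.Chars.find.go, List.isPrefixOf, List.isPrefixOf_nil_left,
    Bool.and_true]
  by_cases h : c = x
  · simp [h]
  · have : (x == c) = false := by simp [beq_eq_false_iff_ne]; exact fun e => h e.symm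
    simp only [this, Bool.false_eq_true, if_false, if_neg h]
    exact findgo_shift x cs 1

theorem find_nil (x : Char) : PySem.Chars.find [] [x] = -1 := by
  simp [PySem.Chars.find, PySem.Chars.find.go]

-- rfind.go is -1 or a nonnegative index
theorem rfindgo_ge (s sub : List Char) (j : Nat) :
    PySem.Chars.rfind.go s sub j = -1 ∨ 0 ≤ PySem.Chars.rfind.go s sub j := by
  induction j with
  | zero => simp only [PySem.Chars.rfind.go]; split_ifs <;> simp
  | succ j ih =>
    simp only [PySem.Chars.rfind.go]
    split_ifs with h
    · right; positivity
    · exact ih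

theorem rfindgo_cons (x c : Char) (cs : List Char) (j : Nat) :
    PySem.Chars.rfind.go (c :: cs) [x] (j + 1) =
      if PySem.Chars.rfind.go cs [x] j = -1 then (if c = x then 0 else -1)
      else PySem.Chars.rfind.go cs [x] j + 1 := by
  induction j with
  | zero =>
    simp only [PySem.Chars.rfind.go, List.drop_succ_cons, List.drop_zero]
    by_cases h : List.isPrefixOf [x] cs
    · simp [h]
    · simp only [h, Bool.false_eq_true, if_false]
      have hx : List.isPrefixOf [x] (c :: cs) = (x == c) := by
        simp [List.isPrefixOf]
      rw [hx]
      by_cases hc : c = x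
      · simp [hc]
      · have : (x == c) = false := by simp [beq_eq_false_iff_ne]; exact fun e => hc e.symm
        simp [this, hc]
  | succ j ih =>
    conv_lhs => rw [PySem.Chars.rfind.go]
    conv_rhs => rw [PySem.Chars.rfind.go]
    simp only [List.drop_succ_cons]
    by_cases h : List.isPrefixOf [x] (List.drop (j + 1) cs)
    · simp [h]
      omega
    · simp only [h, Bool.false_eq_true, if_false]
      exact ih

theorem rfind_cons (x c : Char) (cs : List Char) :
    PySem.Chars.rfind (c :: cs) [x] =
      if PySem.Chars.rfind cs [x] = -1 then (if c = x then 0 else -1)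
      else PySem.Chars.rfind cs [x] + 1 := by
  simp only [PySem.Chars.rfind, List.length_cons]
  exact rfindgo_cons x c cs cs.length

theorem rfind_ge (s : List Char) (x : Char) :
    PySem.Chars.rfind s [x] = -1 ∨ 0 ≤ PySem.Chars.rfind s [x] := rfindgo_ge s [x] s.length

theorem rfind_nil (x : Char) : PySem.Chars.rfind [] [x] = -1 := by
  simp [PySem.Chars.rfind, PySem.Chars.rfind.go]

-- the accumulator-carrying loop of A computed from the two directed searches
theorem goA_char (cs : List Char) (k f l : Int) :
    goA (PySem.List.enumerate cs k) f l =
      if PySem.Chars.find cs [')'] = -1 then none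
      else some
        ((if PySem.Chars.rfind (cs.take (PySem.Chars.find cs [')']).toNat) ['('] = -1 then f
          else k + PySem.Chars.rfind (cs.take (PySem.Chars.find cs [')']).toNat) ['(']),
         k + PySem.Chars.find cs [')']) := by
  induction cs generalizing k f l with
  | nil => simp [PySem.List.enumerate, goA, find_nil]
  | cons c cs ih =>
    rw [PySem.List.enumerate]
    by_cases hcl : c = ')'
    · subst hcl
      simp [goA, find_cons, rfind_nil]
    · rw [find_cons]
      simp only [if_neg hcl]
      by_cases hf : PySem.Chars.find cs [')'] = -1
      · simp only [hf, if_pos rfl, if_pos rfl]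
        by_cases hop : c = '('
        · subst hop; simp only [goA, if_pos rfl]; rw [ih]; simp [hf]
        · simp only [goA, if_neg hop, if_neg hcl]; rw [ih]; simp [hf]
      · have hge : 0 ≤ PySem.Chars.find cs [')'] := by
          have := PySem.Chars.neg_one_le_find cs [')']
          omega
        have hne : PySem.Chars.find cs [')'] + 1 ≠ -1 := by omega
        simp only [hf, if_neg, Bool.false_eq_true, if_false, if_neg hne]
        have htn : (PySem.Chars.find cs [')'] + 1).toNat = (PySem.Chars.find cs [')']).toNat + 1 := by
          omega
        rw [htn, List.take_succ_cons, rfind_cons]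
        set r := PySem.Chars.rfind (cs.take (PySem.Chars.find cs [')']).toNat) ['('] with hr
        have hrge := rfind_ge (cs.take (PySem.Chars.find cs [')']).toNat) '('
        rw [← hr] at hrge
        by_cases hop : c = '('
        · subst hop
          simp only [goA, if_pos rfl]
          rw [ih]
          simp only [hf, Bool.false_eq_true, if_false]
          by_cases hrm : r = -1
          · simp only [hrm, if_pos rfl]
            norm_num
            omega
          · simp only [hrm, Bool.false_eq_true, if_false, if_neg hrm]
            have : r + 1 ≠ -1 := by omega
            simp only [this, Bool.false_eq_true, if_false, if_neg this]
            norm_num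
            omega
        · simp only [goA, if_neg hop, if_neg hcl]
          rw [ih]
          simp only [hf, Bool.false_eq_true, if_false]
          by_cases hrm : r = -1
          · simp only [hrm, if_pos rfl, if_neg hop]
            norm_num
            omega
          · have : r + 1 ≠ -1 := by omega
            simp only [hrm, Bool.false_eq_true, if_false, this, if_neg hrm, if_neg this]
            norm_num
            omega

theorem rfindFrom_zero (l sub : List Char) (c : Int) (h0 : 0 ≤ c) (hle : c ≤ l.length) :
    PySem.Chars.rfindFrom l sub 0 (some c) =
      (if PySem.Chars.rfind (l.take c.toNat) sub = -1 then -1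
       else PySem.Chars.rfind (l.take c.toNat) sub) := by
  rw [PySem.Chars.rfindFrom]
  simp only [if_neg (show ¬ ((l.length:Int) < c) by omega),
    if_neg (show ¬ ((0:Int) < 0) by omega), Int.toNat_zero, List.drop_zero,
    if_neg (show ¬ (c < (0:Int)) by omega)]
  split_ifs with h <;> simp

-- ===== VERDICT (by name: the statement is the Claim_ definition above) =====
theorem get_indexes_of_parentheses_spec : Claim_equal_get_indexes_of_parentheses := by
  intro e _
  unfold Spec_get_indexes_of_parentheses get_indexes_of_parentheses get_indexes_of_parentheses_alt
  rw [goA_char]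
  simp only [PySem.Str.find_eq, PySem.Str.rfindFrom_eq,
    show (")" : String).toList = [')'] from by decide,
    show ("(" : String).toList = ['('] from by decide]
  by_cases hf : PySem.Chars.find e.toList [')'] = -1
  · simp [hf]
  · have hge : 0 ≤ PySem.Chars.find e.toList [')'] := by
      have := PySem.Chars.neg_one_le_find e.toList [')']
      omega
    have hle : PySem.Chars.find e.toList [')'] ≤ e.toList.length :=
      PySem.Chars.find_le_length e.toList [')']
    simp only [hf, Bool.false_eq_true, if_false, if_neg hf]
    rw [rfindFrom_zero e.toList ['('] _ hge hle]
    have hrge := rfindgo_ge (e.toList.take (PySem.Chars.find e.toList [')']).toNat) ['(']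
      (e.toList.take (PySem.Chars.find e.toList [')']).toNat).length
    by_cases hrm : PySem.Chars.rfind (e.toList.take (PySem.Chars.find e.toList [')']).toNat) ['('] = -1
    · simp [hrm]
    · have h0 : 0 ≤ PySem.Chars.rfind (e.toList.take (PySem.Chars.find e.toList [')']).toNat) ['('] := by
        rcases hrge with h | h
        · exact absurd h hrm
        · exact h
      simp [hrm, max_eq_left h0]
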